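-- pv_equiv track=rewrite | github.com/eliottcassidy2000/math | 04-computation/two_and_three_universality.py | count_disjoint_cycles
-- ===== SOURCE A (Python) =====
-- from collections import defaultdict
--
-- def count_disjoint_cycles(A, n):
--     """Count α_k = #{collections of k disjoint directed odd cycles}."""
--     # First find ALL directed odd cycles
--     cycles = []
--     seen = set()
--
--     def find_cycles(path, start, used):
--         last = path[-1]
--         length = len(path)
--         if length >= 3 and length % 2 == 1 and A[last][start]:
--             # Found odd cycle
--             normalized = min(path[i:] + path[:i] for i in range(length))
--             key = tuple(normalized)
--             if key not in seen:
--                 seen.add(key)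
--                 cycles.append(frozenset(path))
--         if length >= n:
--             return
--         for v in range(n):
--             if v not in used and A[last][v]:
--                 find_cycles(path + [v], start, used | {v})
--
--     for start in range(n):
--         find_cycles([start], start, {start})
--
--     # Now count disjoint collections
--     alpha = defaultdict(int)
--     alpha[0] = 1  # empty collection
--
--     def count_collections(idx, used, k):
--         alpha[k] += 1
--         for j in range(idx, len(cycles)):
--             if not (cycles[j] & used):
--                 count_collections(j+1, used | cycles[j], k+1)
--
--     count_collections(0, frozenset(), 0)
--     del alpha[0]
--     return dict(alpha)
-- ===== SOURCE B (Python) =====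
-- def count_disjoint_cycles(A, n):
--     """Count alpha_k = #{collections of k disjoint directed odd cycles}."""
--     # Generate every simple odd-cycle path as a pure list (no shared state),
--     # then dedup rotations with a dict keyed by the minimal rotation.
--     def gen(path, used):
--         found = []
--         last = path[-1]
--         L = len(path)
--         if L >= 3 and L % 2 == 1 and A[last][path[0]]:
--             found.append(path)
--         if L < n:
--             for v in range(n):
--                 if v not in used and A[last][v]:
--                     found += gen(path + [v], used | {v})
--         return found
--
--     by_key = {}
--     for start in range(n):
--         for p in gen([start], {start}):
--             key = min(tuple(p[i:] + p[:i]) for i in range(len(p)))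
--             if key not in by_key:
--                 by_key[key] = frozenset(p)
--     cycles = list(by_key.values())
--
--     # Dynamic programming over the cycle list: parts holds every
--     # pairwise-disjoint sub-collection of the processed prefix.
--     parts = [(frozenset(), 0)]
--     for c in cycles:
--         parts = parts + [(u | c, k + 1) for (u, k) in parts if not (u & c)]
--
--     counts = {}
--     for _, k in parts:
--         if k > 0:
--             counts[k] = counts.get(k, 0) + 1
--     return {k: counts[k] for k in sorted(counts)}
-- ===== Notes on version B (the rewrite author's own statement) =====
-- stated objective: alternative
-- what changed: A's stateful dedup-during-DFS cycle search and recursive subset-counting DFS are replaced by a pure generate-all-paths pass deduplicated afterwards with a dict keyed by minimal rotation, and by a dynamic-programming fold that extends the list of all pairwise-disjoint sub-collections one cycle at a time, emitting counts per size from that list (keys sorted).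
-- outside the precondition, e.g. on count_disjoint_cycles([[0, 1], [0]], 2): A returns {}, B returns {}
import Mathlib
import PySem

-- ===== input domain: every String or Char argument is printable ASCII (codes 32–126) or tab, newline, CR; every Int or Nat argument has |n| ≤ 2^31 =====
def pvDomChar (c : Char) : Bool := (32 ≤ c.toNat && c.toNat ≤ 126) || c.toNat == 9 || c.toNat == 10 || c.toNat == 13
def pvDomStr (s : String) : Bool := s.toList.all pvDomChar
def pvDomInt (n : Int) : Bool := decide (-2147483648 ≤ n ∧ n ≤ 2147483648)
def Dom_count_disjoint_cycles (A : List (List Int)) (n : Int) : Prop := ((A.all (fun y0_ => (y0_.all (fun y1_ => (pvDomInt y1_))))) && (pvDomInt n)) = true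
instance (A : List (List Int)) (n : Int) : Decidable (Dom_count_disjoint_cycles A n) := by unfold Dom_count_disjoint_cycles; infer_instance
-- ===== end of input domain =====

-- B replaces A's stateful dedup-during-DFS cycle search and counting DFS by a pure
-- generate-then-dedup pass plus a DP over the cycle list (objective: alternative, same cost).


-- ===== PORT A =====
-- helpers shared by both ports: sub-expressions that appear verbatim in both Pythons
-- A[i][j] (total form; Pre_ keeps the indices in range)
def pvEntry (A : List (List Int)) (i j : Int) : Int :=
  PySem.List.pyGetD (PySem.List.pyGetD A i []) j 0

-- min(path[i:] + path[:i] for i in range(len(path)))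
def pvRotMin (p : List Int) : List Int :=
  (PySem.List.min?
    ((PySem.List.pyRange 0 p.length 1).map
      (fun i => PySem.List.slice p (some i) none ++ PySem.List.slice p none (some i)))
    (fun x => x)).getD []

-- find_cycles(path, start, used), threading the (cycles, seen) state; the recursion depth is
-- bounded by n - len(path), so fuel n.toNat is always sufficient (the fuel-0 branch is unreachable)
def pvFindA (A : List (List Int)) (n : Int) (start : Int) :
    Nat → List Int → PySem.Set Int →
    (List (PySem.Set Int) × PySem.Set (List Int)) → (List (PySem.Set Int) × PySem.Set (List Int))
  | 0, _, _, st => st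
  | fuel+1, path, used, st =>
    let last := PySem.List.pyGetD path (-1) 0
    let len : Int := path.length
    let st1 :=
      if 3 ≤ len ∧ PySem.Int.mod len 2 = 1 ∧ pvEntry A last start ≠ 0 then
        let key := pvRotMin path
        if PySem.Set.contains st.2 key then st
        else (st.1 ++ [PySem.Set.ofList path], PySem.Set.add st.2 key)
      else st
    if n ≤ len then st1
    else
      (PySem.List.pyRange 0 n 1).foldl
        (fun st' v =>
          if PySem.Set.contains used v = false ∧ pvEntry A last v ≠ 0 then
            pvFindA A n start fuel (path ++ [v]) (PySem.Set.union used [v]) st'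
          else st') st1

-- count_collections(idx, used, k); recursion depth bounded by len(cycles)+1-idx, fuel as below
def pvCountA (cycles : List (PySem.Set Int)) :
    Nat → Int → PySem.Set Int → Int → PySem.Dict Int Int → PySem.Dict Int Int
  | 0, _, _, _, d => d
  | fuel+1, idx, used, k, d =>
    let d1 := d.insert k (d.getD k 0 + 1)
    (PySem.List.pyRange idx (cycles.length : Int) 1).foldl
      (fun d' j =>
        let cj := PySem.List.pyGetD cycles j []
        if PySem.Set.inter cj used = [] then
          pvCountA cycles fuel (j+1) (PySem.Set.union used cj) (k+1) d'
        else d') d1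

def count_disjoint_cycles (A : List (List Int)) (n : Int) : List (Int × Int) :=
  let st :=
    (PySem.List.pyRange 0 n 1).foldl
      (fun st s => pvFindA A n s n.toNat [s] (PySem.Set.ofList [s]) st)
      ([], PySem.Set.empty)
  let cycles := st.1
  let alpha0 : PySem.Dict Int Int := PySem.Dict.empty.insert 0 1
  let alpha := pvCountA cycles (cycles.length + 1) 0 PySem.Set.empty 0 alpha0
  (alpha.erase 0).items

-- ===== PORT B =====
-- gen(path, used): pure list of all simple odd-cycle paths extending path (same fuel bound as A)
def pvGenB (A : List (List Int)) (n : Int) :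
    Nat → List Int → PySem.Set Int → List (List Int)
  | 0, _, _ => []
  | fuel+1, path, used =>
    let last := PySem.List.pyGetD path (-1) 0
    let len : Int := path.length
    let found :=
      if 3 ≤ len ∧ PySem.Int.mod len 2 = 1 ∧ pvEntry A last (PySem.List.pyGetD path 0 0) ≠ 0 then
        [path]
      else []
    if len < n then
      (PySem.List.pyRange 0 n 1).foldl
        (fun acc v =>
          if PySem.Set.contains used v = false ∧ pvEntry A last v ≠ 0 then
            acc ++ pvGenB A n fuel (path ++ [v]) (PySem.Set.union used [v])
          else acc) found
    else found

def count_disjoint_cycles_alt (A : List (List Int)) (n : Int) : List (Int × Int) :=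
  let byKey : PySem.Dict (List Int) (PySem.Set Int) :=
    (PySem.List.pyRange 0 n 1).foldl
      (fun d s =>
        (pvGenB A n n.toNat [s] (PySem.Set.ofList [s])).foldl
          (fun d p =>
            let key := pvRotMin p
            if d.contains key then d else d.insert key (PySem.Set.ofList p)) d)
      PySem.Dict.empty
  let cycles := byKey.values
  let parts :=
    cycles.foldl
      (fun parts c =>
        parts ++ (parts.filter (fun uk => PySem.Set.inter uk.1 c = [])).map
          (fun uk => (PySem.Set.union uk.1 c, uk.2 + 1)))
      [((PySem.Set.empty : PySem.Set Int), (0 : Int))]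
  let counts :=
    parts.foldl
      (fun d uk => if uk.2 > 0 then d.insert uk.2 (d.getD uk.2 0 + 1) else d)
      (PySem.Dict.empty : PySem.Dict Int Int)
  ((PySem.List.sorted counts.keys (fun x => x) false).foldl
      (fun d k => d.insert k (counts.getD k 0)) (PySem.Dict.empty : PySem.Dict Int Int)).items

-- ===== PRECONDITION & SPEC =====
-- Pre_ excludes the inputs where Python A raises IndexError (n > len(A), or a row shorter than n),
-- by requiring the first n rows to have length ≥ n; this clean square-shape condition is slightly
-- stronger than A's exact access pattern (A never reads diagonal entries, so a few ragged matrices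
-- on which A happens to return {} are also excluded — see the cite in claim.json).
def Pre_count_disjoint_cycles (A : List (List Int)) (n : Int) : Prop :=
  2 ≤ n → ((n ≤ (A.length : Int)) ∧ ∀ row ∈ A.take n.toNat, n ≤ (row.length : Int))
instance (A : List (List Int)) (n : Int) : Decidable (Pre_count_disjoint_cycles A n) := by
  unfold Pre_count_disjoint_cycles; infer_instance

def pvWitness_count_disjoint_cycles : List (List Int) × Int := ([[0,1,1],[1,0,1],[1,1,0]], 3)

def Spec_count_disjoint_cycles (A : List (List Int)) (n : Int) (out : List (Int × Int)) : Prop := out = count_disjoint_cycles_alt A n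
instance (A : List (List Int)) (n : Int) (out : List (Int × Int)) : Decidable (Spec_count_disjoint_cycles A n out) := by unfold Spec_count_disjoint_cycles; infer_instance

-- ===== CLAIM (what is proved, stated in full; the proofs are below) =====
def Claim_equal_count_disjoint_cycles : Prop := ∀ (A : List (List Int)) (n : Int), Dom_count_disjoint_cycles A n → Pre_count_disjoint_cycles A n → Spec_count_disjoint_cycles A n (count_disjoint_cycles A n)

-- ===== LEMMAS AND PROOFS =====

-- ---- proof-only definitions ----

-- one dedup step of A's find_cycles, applied to a candidate path
def pvDedupStep (st : List (PySem.Set Int) × PySem.Set (List Int)) (p : List Int) :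
    List (PySem.Set Int) × PySem.Set (List Int) :=
  let key := pvRotMin p
  if PySem.Set.contains st.2 key then st
  else (st.1 ++ [PySem.Set.ofList p], PySem.Set.add st.2 key)

-- one dedup step of B's by_key dict
def pvDictStep (d : PySem.Dict (List Int) (PySem.Set Int)) (p : List Int) :
    PySem.Dict (List Int) (PySem.Set Int) :=
  let key := pvRotMin p
  if d.contains key then d else d.insert key (PySem.Set.ofList p)

-- the multiset of all candidate odd-cycle paths, in generation order
def pvPaths (A : List (List Int)) (n : Int) : List (List Int) :=
  (PySem.List.pyRange 0 n 1).flatMap (fun s => pvGenB A n n.toNat [s] (PySem.Set.ofList [s]))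

-- sizes of the disjoint sub-collections counted by A's count_collections, in DFS order (fuel-free)
def pvSzs (cs : List (PySem.Set Int)) (u : PySem.Set Int) (k : Int) : List Int :=
  k :: (PySem.List.pyRange 0 (cs.length : Int) 1).attach.flatMap
    (fun j =>
      let cj := PySem.List.pyGetD cs j.1 []
      if PySem.Set.inter cj u = [] then
        pvSzs (cs.drop (j.1 + 1).toNat) (PySem.Set.union u cj) (k + 1)
      else [])
termination_by cs.length
decreasing_by
  have hj := (PySem.List.mem_pyRange_one).1 j.2
  have h2 : 0 < cs.length := by
    rcases hj with ⟨h0, hlt⟩; omega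
  simp [List.length_drop]; omega

-- the canonical multiset of (union, size) pairs of all pairwise-disjoint sub-collections
def pvMP : List (PySem.Set Int) → PySem.Set Int → Multiset (PySem.Set Int × Int)
  | [], u => {(u, 0)}
  | c :: r, u =>
    pvMP r u +
      (if PySem.Set.inter c u = [] then
        (pvMP r (PySem.Set.union u c)).map (fun p => (p.1, p.2 + 1))
      else 0)

-- "every element is 0 or is preceded (within ctx ++ its prefix) by its predecessor"
def pvGood (ctx : List Int) (ks : List Int) : Prop :=
  ∀ pre x post, ks = pre ++ x :: post → x = 0 ∨ x - 1 ∈ ctx ++ pre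

-- ---- phase 1: A's dedup DFS = fold of pvDedupStep over B's generated paths ----

theorem pv_fuse1 (A : List (List Int)) (n : Int) :
    ∀ (fuel : Nat) (path : List Int) (used : PySem.Set Int)
      (st : List (PySem.Set Int) × PySem.Set (List Int)),
      path ≠ [] →
      pvFindA A n (PySem.List.pyGetD path 0 0) fuel path used st =
        (pvGenB A n fuel path used).foldl pvDedupStep st := by
  intro fuel
  induction fuel with
  | zero => intro path used st _; rfl
  | succ f ih =>
    intro path used st hne
    rw [pvFindA, pvGenB]
    dsimp only
    set start := PySem.List.pyGetD path 0 0 with hstart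
    set last := PySem.List.pyGetD path (-1) 0 with hlast
    set C : Prop := 3 ≤ (path.length : Int) ∧ PySem.Int.mod (path.length : Int) 2 = 1 ∧
      pvEntry A last start ≠ 0 with hC
    have hfound : ∀ s : List (PySem.Set Int) × PySem.Set (List Int),
        List.foldl pvDedupStep s (if C then [path] else []) =
          (if C then
            (if PySem.Set.contains s.2 (pvRotMin path) then s
             else (s.1 ++ [PySem.Set.ofList path], PySem.Set.add s.2 (pvRotMin path)))
           else s) := by
      intro s
      by_cases hc : C
      · rw [if_pos hc, if_pos hc]; rfl
      · rw [if_neg hc, if_neg hc]; rfl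
    by_cases hl : (path.length : Int) < n
    · rw [if_neg (not_le.2 hl), if_pos hl]
      have hflat :
          List.foldl
            (fun acc v =>
              if PySem.Set.contains used v = false ∧ pvEntry A last v ≠ 0 then
                acc ++ pvGenB A n f (path ++ [v]) (used.union [v])
              else acc)
            (if C then [path] else []) (PySem.List.pyRange 0 n 1) =
          (if C then [path] else []) ++
            (PySem.List.pyRange 0 n 1).flatMap
              (fun v =>
                if PySem.Set.contains used v = false ∧ pvEntry A last v ≠ 0 then
                  pvGenB A n f (path ++ [v]) (used.union [v])
                else []) := by
        rw [PySem.List.foldl_congr_mem _ _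
          (fun acc v =>
            acc ++ (if PySem.Set.contains used v = false ∧ pvEntry A last v ≠ 0 then
              pvGenB A n f (path ++ [v]) (used.union [v]) else [])) _
          (by
            intro acc v _
            beta_reduce
            by_cases hp : PySem.Set.contains used v = false ∧ pvEntry A last v ≠ 0
            · rw [if_pos hp, if_pos hp]
            · rw [if_neg hp, if_neg hp, List.append_nil])]
        exact PySem.List.foldl_append_eq_flatMap _ _ _
      rw [hflat, List.foldl_append, hfound]
      have hloop : ∀ (l : List Int) (s : List (PySem.Set Int) × PySem.Set (List Int)),
          List.foldl
            (fun st' v =>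
              if PySem.Set.contains used v = false ∧ pvEntry A last v ≠ 0 then
                pvFindA A n start f (path ++ [v]) (used.union [v]) st'
              else st') s l =
          List.foldl pvDedupStep s
            (l.flatMap
              (fun v =>
                if PySem.Set.contains used v = false ∧ pvEntry A last v ≠ 0 then
                  pvGenB A n f (path ++ [v]) (used.union [v])
                else [])) := by
        intro l
        induction l with
        | nil => intro s; rfl
        | cons v t iht =>
          intro s
          simp only [List.foldl_cons, List.flatMap_cons]
          by_cases hp : PySem.Set.contains used v = false ∧ pvEntry A last v ≠ 0
          · rw [if_pos hp, if_pos hp, List.foldl_append, iht]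
            congr 1
            have hh : start = PySem.List.pyGetD (path ++ [v]) 0 0 := by
              rw [hstart, PySem.List.pyGetD_zero, PySem.List.pyGetD_zero]
              cases path with
              | nil => exact absurd rfl hne
              | cons a t2 => simp
            rw [hh]
            exact ih (path ++ [v]) (used.union [v]) s (by simp)
          · rw [if_neg hp, if_neg hp, List.nil_append, iht]
      exact hloop _ _
    · rw [if_pos (not_lt.1 hl), if_neg hl, hfound]

theorem pv_foldl_flatMap {α β γ : Type} (f : γ → β → γ) (g : α → List β) :
    ∀ (l : List α) (init : γ),
      l.foldl (fun acc x => (g x).foldl f acc) init = (l.flatMap g).foldl f init := by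
  intro l
  induction l with
  | nil => intro init; rfl
  | cons x t ih => intro init; simp [List.flatMap_cons, List.foldl_append, ih]

theorem pv_dedup_dict (ps : List (List Int)) :
    ∀ (st : List (PySem.Set Int) × PySem.Set (List Int))
      (d : PySem.Dict (List Int) (PySem.Set Int)),
      st.1 = d.values → st.2 = d.keys →
      (ps.foldl pvDedupStep st).1 = (ps.foldl pvDictStep d).values ∧
      (ps.foldl pvDedupStep st).2 = (ps.foldl pvDictStep d).keys := by
  induction ps with
  | nil => intro st d h1 h2; exact ⟨h1, h2⟩
  | cons p t ih =>
    intro st d h1 h2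
    simp only [List.foldl_cons]
    by_cases hk : pvRotMin p ∈ d.keys
    · have hsc : PySem.Set.contains st.2 (pvRotMin p) = true := by
        rw [PySem.Set.contains_iff, h2]; exact hk
      have hdc : d.contains (pvRotMin p) = true := (PySem.Dict.contains_iff_mem_keys d _).2 hk
      have e1 : pvDedupStep st p = st := by simp only [pvDedupStep, hsc, if_true]
      have e2 : pvDictStep d p = d := by simp only [pvDictStep, hdc, if_true]
      rw [e1, e2]; exact ih st d h1 h2
    · have hsc : PySem.Set.contains st.2 (pvRotMin p) = false := by
        rw [← Bool.not_eq_true, PySem.Set.contains_iff, h2]; exact hk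
      have hdc : d.contains (pvRotMin p) = false := by
        rw [← Bool.not_eq_true, PySem.Dict.contains_iff_mem_keys]; exact hk
      have e1 : pvDedupStep st p =
          (st.1 ++ [PySem.Set.ofList p], PySem.Set.add st.2 (pvRotMin p)) := by
        simp only [pvDedupStep, hsc, Bool.false_eq_true, if_false]
      have e2 : pvDictStep d p = d.insert (pvRotMin p) (PySem.Set.ofList p) := by
        simp only [pvDictStep, hdc, Bool.false_eq_true, if_false]
      rw [e1, e2]
      refine ih _ _ ?_ ?_
      · show st.1 ++ [PySem.Set.ofList p] = (d.insert (pvRotMin p) (PySem.Set.ofList p)).values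
        simp only [PySem.Dict.values, PySem.Dict.items_insert_of_not_contains d _ hdc,
          List.map_append, h1]
        rfl
      · show PySem.Set.add st.2 (pvRotMin p) = (d.insert (pvRotMin p) (PySem.Set.ofList p)).keys
        rw [PySem.Dict.keys_insert_of_not_contains d _ hdc, ← h2,
          PySem.Set.add_of_not_mem (by rw [h2]; exact hk)]

-- ---- phase 2: counting ----

theorem pv_szs_plain (cs : List (PySem.Set Int)) (u : PySem.Set Int) (k : Int) :
    pvSzs cs u k =
      k :: (PySem.List.pyRange 0 (cs.length : Int) 1).flatMap
        (fun j =>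
          if PySem.Set.inter (PySem.List.pyGetD cs j []) u = [] then
            pvSzs (cs.drop (j + 1).toNat) (PySem.Set.union u (PySem.List.pyGetD cs j [])) (k + 1)
          else []) := by
  rw [pvSzs]
  congr 1
  conv_rhs => rw [← List.attach_map_subtype_val (PySem.List.pyRange 0 (cs.length : Int) 1),
    List.flatMap_map]

theorem pv_cnt_fuse (cycles : List (PySem.Set Int)) :
    ∀ (fuel : Nat) (idx : Int) (u : PySem.Set Int) (k : Int) (d : PySem.Dict Int Int),
      0 ≤ idx → (cycles.length : Int) < idx + fuel →
      idx ≤ (cycles.length : Int) →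
      pvCountA cycles fuel idx u k d =
        (pvSzs (cycles.drop idx.toNat) u k).foldl
          (fun d x => d.insert x (d.getD x 0 + 1)) d := by
  intro fuel
  induction fuel with
  | zero => intro idx u k d h0 hf hle; omega
  | succ f ih =>
    intro idx u k d h0 hf hle
    rw [pvCountA, pv_szs_plain]
    dsimp only
    rw [List.foldl_cons]
    have hM : (cycles.drop idx.toNat).length = ((cycles.length : Int) - idx).toNat := by
      simp only [List.length_drop]; omega
    set M : Nat := ((cycles.length : Int) - idx).toNat with hMdef
    rw [hM]
    have hr1 : PySem.List.pyRange idx (cycles.length : Int) 1 =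
        (List.range M).map (fun (m : Nat) => idx + (m : Int)) := by
      rw [PySem.List.pyRange_one]
    have hr2 : PySem.List.pyRange 0 (M : Int) 1 =
        (List.range M).map (fun (m : Nat) => 0 + (m : Int)) := by
      rw [PySem.List.pyRange_one]; norm_num
    rw [hr1, hr2, List.foldl_map, List.flatMap_map]
    have inner : ∀ (ms : List Nat), (∀ m ∈ ms, m < M) →
        ∀ d' : PySem.Dict Int Int,
        List.foldl
          (fun d' (m : Nat) =>
            if PySem.Set.inter (PySem.List.pyGetD cycles (idx + (m : Int)) []) u = [] then
              pvCountA cycles f (idx + (m : Int) + 1)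
                (u.union (PySem.List.pyGetD cycles (idx + (m : Int)) [])) (k + 1) d'
            else d') d' ms =
        List.foldl (fun d x => d.insert x (d.getD x 0 + 1)) d'
          (ms.flatMap
            (fun (m : Nat) =>
              if PySem.Set.inter (PySem.List.pyGetD (cycles.drop idx.toNat) (0 + (m : Int)) []) u = [] then
                pvSzs ((cycles.drop idx.toNat).drop ((0 + (m : Int)) + 1).toNat)
                  (u.union (PySem.List.pyGetD (cycles.drop idx.toNat) (0 + (m : Int)) [])) (k + 1)
              else [])) := by
      intro ms
      induction ms with
      | nil => intro _ d'; rfl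
      | cons m t iht =>
        intro hmem d'
        have hmM : m < M := hmem m List.mem_cons_self
        have hget : PySem.List.pyGetD (cycles.drop idx.toNat) (0 + (m : Int)) [] =
            PySem.List.pyGetD cycles (idx + (m : Int)) [] := by
          rw [zero_add, PySem.List.pyGetD_natCast, PySem.List.pyGetD_of_nonneg _ _ (by omega)]
          simp only [List.getD_eq_getElem?_getD, List.getElem?_drop]
          congr 2
          omega
        have hdrop : (cycles.drop idx.toNat).drop ((0 + (m : Int)) + 1).toNat =
            cycles.drop ((idx + (m : Int) + 1)).toNat := by
          rw [List.drop_drop]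
          congr 1
          omega
        simp only [List.foldl_cons, List.flatMap_cons]
        rw [hget, hdrop]
        by_cases hc : PySem.Set.inter (PySem.List.pyGetD cycles (idx + (m : Int)) []) u = []
        · rw [if_pos hc, if_pos hc, List.foldl_append]
          rw [ih (idx + (m : Int) + 1) (u.union (PySem.List.pyGetD cycles (idx + (m : Int)) []))
            (k + 1) d' (by omega) (by omega) (by omega)]
          exact iht (fun x hx => hmem x (List.mem_cons_of_mem _ hx)) _
        · rw [if_neg hc, if_neg hc, List.nil_append]
          exact iht (fun x hx => hmem x (List.mem_cons_of_mem _ hx)) _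
    exact inner (List.range M) (fun m hm => List.mem_range.mp hm) _

theorem pv_szs_mp :
    ∀ (cs : List (PySem.Set Int)) (u : PySem.Set Int) (k : Int),
      ((pvSzs cs u k : List Int) : Multiset Int) = (pvMP cs u).map (fun p => k + p.2) := by
  have hnil : ∀ (u : PySem.Set Int) (k : Int),
      ((pvSzs [] u k : List Int) : Multiset Int) = (pvMP [] u).map (fun p => k + p.2) := by
    intro u k
    rw [pv_szs_plain]
    simp [pvMP]
  have main : ∀ (N : Nat) (cs : List (PySem.Set Int)), cs.length ≤ N →
      ∀ (u : PySem.Set Int) (k : Int),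
      ((pvSzs cs u k : List Int) : Multiset Int) = (pvMP cs u).map (fun p => k + p.2) := by
    intro N
    induction N with
    | zero =>
      intro cs h u k
      rw [List.length_eq_zero_iff.mp (Nat.le_zero.mp h)]
      exact hnil u k
    | succ N ihN =>
      intro cs h u k
      cases cs with
      | nil => exact hnil u k
      | cons c r =>
        have hr : r.length ≤ N := by simpa using h
        have hr2 := pv_szs_plain r u k
        have key : pvSzs (c :: r) u k =
            k :: ((if PySem.Set.inter c u = [] then pvSzs r (u.union c) (k + 1) else []) ++
              (PySem.List.pyRange 0 (r.length : Int) 1).flatMap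
                (fun j =>
                  if PySem.Set.inter (PySem.List.pyGetD r j []) u = [] then
                    pvSzs (r.drop (j + 1).toNat) (u.union (PySem.List.pyGetD r j [])) (k + 1)
                  else [])) := by
          rw [pv_szs_plain]
          congr 1
          have hlen : ((c :: r).length : Int) = (r.length : Int) + 1 := by
            push_cast [List.length_cons]; ring
          rw [hlen, PySem.List.pyRange_one_cons (by positivity), List.flatMap_cons]
          simp only [zero_add]
          congr 1
          · have h1 : PySem.List.pyGetD (c :: r) 0 ([] : PySem.Set Int) = c := by
              simp [PySem.List.pyGetD_zero]
            rw [h1]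
            norm_num
          · have hsh : PySem.List.pyRange 1 ((r.length : Int) + 1) 1 =
                (List.range r.length).map (fun (m : Nat) => 1 + (m : Int)) := by
              rw [PySem.List.pyRange_one]
              congr 2
              omega
            have hsh2 : PySem.List.pyRange 0 (r.length : Int) 1 =
                (List.range r.length).map (fun (m : Nat) => 0 + (m : Int)) := by
              rw [PySem.List.pyRange_one]
              congr 2
            rw [hsh, hsh2, List.flatMap_map, List.flatMap_map]
            congr 1
            funext m
            have hg1 : PySem.List.pyGetD (c :: r) (1 + (m : Int)) ([] : PySem.Set Int) =
                PySem.List.pyGetD r (0 + (m : Int)) [] := by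
              have e1 : (1 : Int) + (m : Int) = ((m + 1 : Nat) : Int) := by push_cast; ring
              have e0 : (0 : Int) + (m : Int) = ((m : Nat) : Int) := by omega
              rw [e1, e0, PySem.List.pyGetD_natCast, PySem.List.pyGetD_natCast]
              simp
            have hd1 : (c :: r).drop ((1 + (m : Int)) + 1).toNat =
                r.drop ((0 + (m : Int)) + 1).toNat := by
              have e1 : ((1 + (m : Int)) + 1).toNat = m + 2 := by omega
              have e2 : ((0 + (m : Int)) + 1).toNat = m + 1 := by omega
              rw [e1, e2]
              rfl
            rw [hg1, hd1]
        rw [key]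
        have ihr := ihN r hr u k
        rw [hr2] at ihr
        simp only [pvMP]
        rw [Multiset.map_add]
        rw [← Multiset.cons_coe, ← Multiset.coe_add]
        by_cases hc : PySem.Set.inter c u = []
        · rw [if_pos hc, if_pos hc]
          have ihc := ihN r hr (u.union c) (k + 1)
          rw [ihc]
          have hmm : ((pvMP r (u.union c)).map (fun p => (p.1, p.2 + 1))).map
              (fun p => k + p.2) = (pvMP r (u.union c)).map (fun p => (k + 1) + p.2) := by
            rw [Multiset.map_map]
            apply Multiset.map_congr rfl
            intro p _
            simp
            ring
          rw [hmm, ← ihr, ← Multiset.cons_coe, Multiset.cons_add]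
          exact congrArg _ (add_comm _ _)
        · rw [if_neg hc, if_neg hc]
          simp only [Multiset.coe_nil, Multiset.zero_add, Multiset.map_zero, Multiset.add_zero]
          rw [← ihr, ← Multiset.cons_coe]
  intro cs u k
  exact main cs.length cs le_rfl u k

theorem pv_inter_comm (s t : PySem.Set Int) :
    (PySem.Set.inter s t = []) ↔ (PySem.Set.inter t s = []) := by
  simp only [PySem.Set.inter, List.filter_eq_nil_iff]
  constructor
  · intro h a ha hb
    exact h a (by simpa using hb) (by simpa using ha)
  · intro h a ha hb
    exact h a (by simpa using hb) (by simpa using ha)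

theorem pv_mp_append (l : List (PySem.Set Int)) (c : PySem.Set Int) :
    ∀ u, pvMP (l ++ [c]) u =
      pvMP l u +
        ((pvMP l u).filter (fun p => PySem.Set.inter p.1 c = [])).map
          (fun p => (PySem.Set.union p.1 c, p.2 + 1)) := by
  induction l with
  | nil =>
    intro u
    simp only [List.nil_append, pvMP]
    by_cases hc : PySem.Set.inter u c = []
    · rw [if_pos ((pv_inter_comm c u).mpr hc)]
      simp [Multiset.filter_singleton, hc]
      try rfl
    · rw [if_neg (fun h => hc ((pv_inter_comm c u).mp h))]
      simp [Multiset.filter_singleton, hc]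
  | cons a l ih =>
    intro u
    have h1 : (a :: l) ++ [c] = a :: (l ++ [c]) := rfl
    rw [h1]
    simp only [pvMP]
    rw [ih u, ih (u.union a)]
    by_cases ha : PySem.Set.inter a u = []
    · rw [if_pos ha, if_pos ha]
      rw [Multiset.map_add, Multiset.filter_add, Multiset.map_add, Multiset.filter_map,
        Multiset.map_map, Multiset.map_map]
      dsimp only [Function.comp_def]
      abel
    · rw [if_neg ha, if_neg ha]
      simp

theorem pv_parts (l : List (PySem.Set Int)) :
    ((l.foldl
        (fun parts c =>
          parts ++ (parts.filter (fun uk => PySem.Set.inter uk.1 c = [])).map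
            (fun uk => (PySem.Set.union uk.1 c, uk.2 + 1)))
        [((PySem.Set.empty : PySem.Set Int), (0 : Int))] : List (PySem.Set Int × Int)) :
        Multiset (PySem.Set Int × Int)) = pvMP l PySem.Set.empty := by
  induction l using List.reverseRecOn with
  | nil => rfl
  | append_singleton l c ihl =>
    rw [List.foldl_append, List.foldl_cons, List.foldl_nil, pv_mp_append]
    rw [← ihl]
    rw [← Multiset.coe_add]
    congr 1
    try rw [Multiset.filter_coe, Multiset.map_coe]

theorem pv_good_nil (ctx : List Int) : pvGood ctx [] := by
  intro pre x post h
  exact absurd h (by simp)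

theorem pv_good_cons (ctx : List Int) (k : Int) (L : List Int)
    (hk : k = 0 ∨ k - 1 ∈ ctx) (hL : pvGood (ctx ++ [k]) L) : pvGood ctx (k :: L) := by
  intro pre x post he
  cases pre with
  | nil =>
    simp only [List.nil_append, List.cons.injEq] at he
    obtain ⟨h1, -⟩ := he
    subst h1
    simpa using hk
  | cons q pre' =>
    simp only [List.cons_append, List.cons.injEq] at he
    rcases hL pre' x post he.2 with h0 | hm
    · exact Or.inl h0
    · refine Or.inr ?_
      rw [← he.1]
      simpa [List.append_assoc] using hm

theorem pv_good_append (ctx xs ys : List Int)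
    (h1 : pvGood ctx xs) (h2 : pvGood (ctx ++ xs) ys) : pvGood ctx (xs ++ ys) := by
  intro pre x post he
  rcases List.append_eq_append_iff.mp he with ⟨as, hpre, hys⟩ | ⟨bs, hxs, hpost⟩
  · rcases h2 as x post hys with h0 | hm
    · exact Or.inl h0
    · refine Or.inr ?_
      rw [hpre]
      simpa [List.append_assoc] using hm
  · cases bs with
    | nil =>
      simp only [List.nil_append] at hpost
      rcases h2 [] x post (by rw [← hpost]; simp) with h0 | hm
      · exact Or.inl h0
      · refine Or.inr ?_
        simpa [hxs] using hm
    | cons b bs' =>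
      simp only [List.cons_append, List.cons.injEq] at hpost
      exact h1 pre x bs' (by rw [hxs, ← hpost.1])

theorem pv_szs_good :
    ∀ (cs : List (PySem.Set Int)) (u : PySem.Set Int) (k : Int) (ctx : List Int),
      (k = 0 ∨ k - 1 ∈ ctx) → pvGood ctx (pvSzs cs u k) := by
  have hS : ∀ (u : PySem.Set Int) (k : Int), pvSzs [] u k = [k] := by
    intro u k
    rw [pv_szs_plain]
    simp
  have main : ∀ (N : Nat) (cs : List (PySem.Set Int)), cs.length ≤ N →
      ∀ (u : PySem.Set Int) (k : Int) (ctx : List Int),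
      (k = 0 ∨ k - 1 ∈ ctx) → pvGood ctx (pvSzs cs u k) := by
    intro N
    induction N with
    | zero =>
      intro cs h u k ctx hk
      rw [List.length_eq_zero_iff.mp (Nat.le_zero.mp h), hS]
      exact pv_good_cons ctx k [] hk (pv_good_nil _)
    | succ N ihN =>
      intro cs h u k ctx hk
      cases cs with
      | nil =>
        rw [hS]
        exact pv_good_cons ctx k [] hk (pv_good_nil _)
      | cons c r =>
        rw [pv_szs_plain]
        apply pv_good_cons ctx k _ hk
        have inner : ∀ (js : List Int), (∀ j ∈ js, 0 ≤ j) → ∀ (ctx' : List Int), k ∈ ctx' →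
            pvGood ctx'
              (js.flatMap
                (fun j =>
                  if PySem.Set.inter (PySem.List.pyGetD (c :: r) j []) u = [] then
                    pvSzs ((c :: r).drop (j + 1).toNat)
                      (u.union (PySem.List.pyGetD (c :: r) j [])) (k + 1)
                  else [])) := by
          intro js
          induction js with
          | nil =>
            intro _ ctx' _
            rw [List.flatMap_nil]
            exact pv_good_nil ctx'
          | cons j t iht =>
            intro hj ctx' hkc
            rw [List.flatMap_cons]
            apply pv_good_append
            · by_cases hc : PySem.Set.inter (PySem.List.pyGetD (c :: r) j []) u = []
              · rw [if_pos hc]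
                refine ihN ((c :: r).drop (j + 1).toNat) ?_ _ (k + 1) ctx'
                  (Or.inr (by simpa using hkc))
                have hj0 : 0 ≤ j := hj j List.mem_cons_self
                have h1' : 1 ≤ (j + 1).toNat := by omega
                have hr : r.length ≤ N := by simpa using h
                simp only [List.length_drop, List.length_cons]
                omega
              · rw [if_neg hc]
                exact pv_good_nil _
            · exact iht (fun x hx => hj x (List.mem_cons_of_mem _ hx)) _
                (List.mem_append_left _ hkc)
        exact inner (PySem.List.pyRange 0 (((c :: r).length : Int)) 1)
          (fun j hj => ((PySem.List.mem_pyRange_one).1 hj).1) (ctx ++ [k]) (by simp)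
  intro cs u k ctx hk
  exact main cs.length cs le_rfl u k ctx hk

theorem pv_upd_good :
    ∀ (ks : List Int) (t : Int), 1 ≤ t →
      (∀ pre x post, ks = pre ++ x :: post → x = 0 ∨ x - 1 ∈ (PySem.List.pyRange 0 t 1) ++ pre) →
      ∃ t', t ≤ t' ∧
        PySem.Set.update (PySem.List.pyRange 0 t 1) ks = PySem.List.pyRange 0 t' 1 ∧
        ∀ x ∈ ks, 0 ≤ x ∧ x < t' := by
  intro ks
  induction ks with
  | nil =>
    intro t ht _
    exact ⟨t, le_rfl, PySem.Set.update_nil _, by simp⟩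
  | cons x ks ihk =>
    intro t ht hg
    have hx : x = 0 ∨ x - 1 ∈ PySem.List.pyRange 0 t 1 := by
      simpa using hg [] x ks rfl
    have hx0 : 0 ≤ x ∧ x ≤ t := by
      rcases hx with h | h
      · omega
      · have := (PySem.List.mem_pyRange_one).1 h
        omega
    rw [PySem.Set.update_cons]
    by_cases hxt : x < t
    · have hmem : x ∈ PySem.List.pyRange 0 t 1 :=
        (PySem.List.mem_pyRange_one).2 ⟨hx0.1, hxt⟩
      rw [PySem.Set.add_of_mem hmem]
      obtain ⟨t', ht', hupd, hall⟩ := ihk t ht (by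
        intro pre y post he
        rcases hg (x :: pre) y post (by rw [he]; rfl) with h0 | hm
        · exact Or.inl h0
        · refine Or.inr ?_
          rcases List.mem_append.mp hm with h1 | h2
          · exact List.mem_append_left _ h1
          · rcases List.mem_cons.mp h2 with h3 | h4
            · exact List.mem_append_left _ (by rw [h3]; exact hmem)
            · exact List.mem_append_right _ h4)
      refine ⟨t', ht', hupd, ?_⟩
      intro y hy
      rcases List.mem_cons.mp hy with h | h
      · rw [h]; exact ⟨hx0.1, by omega⟩
      · exact hall y h
    · have hxeq : x = t := by omega
      have hnmem : x ∉ PySem.List.pyRange 0 t 1 := by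
        intro hm
        have := (PySem.List.mem_pyRange_one).1 hm
        omega
      rw [PySem.Set.add_of_not_mem hnmem, hxeq, ← PySem.List.pyRange_one_succ_right (by omega)]
      obtain ⟨t', ht', hupd, hall⟩ := ihk (t + 1) (by omega) (by
        intro pre y post he
        rcases hg (x :: pre) y post (by rw [he]; rfl) with h0 | hm
        · exact Or.inl h0
        · refine Or.inr ?_
          rcases List.mem_append.mp hm with h1 | h2
          · refine List.mem_append_left _ ?_
            have := (PySem.List.mem_pyRange_one).1 h1
            exact (PySem.List.mem_pyRange_one).2 ⟨this.1, by omega⟩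
          · rcases List.mem_cons.mp h2 with h3 | h4
            · refine List.mem_append_left _ ?_
              exact (PySem.List.mem_pyRange_one).2 ⟨by omega, by omega⟩
            · exact List.mem_append_right _ h4)
      refine ⟨t', by omega, hupd, ?_⟩
      intro y hy
      rcases List.mem_cons.mp hy with h | h
      · rw [h]; exact ⟨by omega, by omega⟩
      · exact hall y h

-- ===== VERDICT (by name: the statement is the Claim_ definition above) =====
theorem count_disjoint_cycles_spec : Claim_equal_count_disjoint_cycles := by
  intro A n _ _
  unfold Spec_count_disjoint_cycles
  set PS : List (List Int) := pvPaths A n with hPS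
  set C : List (PySem.Set Int) := (PS.foldl pvDictStep PySem.Dict.empty).values with hC
  set ks : List Int := pvSzs C PySem.Set.empty 0 with hks
  set d0 : PySem.Dict Int Int := PySem.Dict.empty.insert 0 1 with hd0
  -- ==== phase 1: both ports build the same cycle list C ====
  have hfun : ∀ (st : List (PySem.Set Int) × PySem.Set (List Int)) (s : Int),
      pvFindA A n s n.toNat [s] (PySem.Set.ofList [s]) st =
        (pvGenB A n n.toNat [s] (PySem.Set.ofList [s])).foldl pvDedupStep st := by
    intro st s
    have hs : PySem.List.pyGetD [s] 0 0 = s := by simp [PySem.List.pyGetD_zero]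
    have h := pv_fuse1 A n n.toNat [s] (PySem.Set.ofList [s]) st (by simp)
    rwa [hs] at h
  have hBigA : count_disjoint_cycles A n =
      ((pvCountA C (C.length + 1) 0 PySem.Set.empty 0 d0).erase 0).items := by
    unfold count_disjoint_cycles
    rw [show (fun (st : List (PySem.Set Int) × PySem.Set (List Int)) (s : Int) =>
          pvFindA A n s n.toNat [s] (PySem.Set.ofList [s]) st) =
        (fun (st : List (PySem.Set Int) × PySem.Set (List Int)) (s : Int) =>
          (pvGenB A n n.toNat [s] (PySem.Set.ofList [s])).foldl pvDedupStep st) from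
      funext fun st => funext fun s => hfun st s]
    rw [pv_foldl_flatMap pvDedupStep (fun s => pvGenB A n n.toNat [s] (PySem.Set.ofList [s]))
      (PySem.List.pyRange 0 n 1) ([], PySem.Set.empty)]
    dsimp only
    rw [(pv_dedup_dict
      ((PySem.List.pyRange 0 n 1).flatMap (fun s => pvGenB A n n.toNat [s] (PySem.Set.ofList [s])))
      ([], PySem.Set.empty) PySem.Dict.empty rfl rfl).1]
    rfl
  have hBigB : count_disjoint_cycles_alt A n =
      (let parts :=
        C.foldl
          (fun parts c =>
            parts ++ (parts.filter (fun uk => PySem.Set.inter uk.1 c = [])).map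
              (fun uk => (PySem.Set.union uk.1 c, uk.2 + 1)))
          [((PySem.Set.empty : PySem.Set Int), (0 : Int))]
      let counts :=
        parts.foldl
          (fun d uk => if uk.2 > 0 then d.insert uk.2 (d.getD uk.2 0 + 1) else d)
          (PySem.Dict.empty : PySem.Dict Int Int)
      ((PySem.List.sorted counts.keys (fun x => x) false).foldl
          (fun d k => d.insert k (counts.getD k 0)) (PySem.Dict.empty : PySem.Dict Int Int)).items) := by
    unfold count_disjoint_cycles_alt
    rw [show (fun (d : PySem.Dict (List Int) (PySem.Set Int)) (p : List Int) =>
          let key := pvRotMin p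
          if d.contains key then d else d.insert key (PySem.Set.ofList p)) = pvDictStep from rfl]
    rw [pv_foldl_flatMap pvDictStep (fun s => pvGenB A n n.toNat [s] (PySem.Set.ofList [s]))
      (PySem.List.pyRange 0 n 1) PySem.Dict.empty]
    rfl
  rw [hBigA, hBigB]
  -- ==== phase 2: the counting ====
  have hcnt : pvCountA C (C.length + 1) 0 PySem.Set.empty 0 d0 =
      ks.foldl (fun d x => d.insert x (d.getD x 0 + 1)) d0 := by
    have h := pv_cnt_fuse C (C.length + 1) 0 PySem.Set.empty 0 d0 le_rfl
      (by push_cast; omega) (by positivity)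
    rwa [show ((0 : Int)).toNat = 0 from rfl, List.drop_zero] at h
  -- A's alpha dict analysis via the Good property
  have hgood0 : pvGood [] ks := pv_szs_good C PySem.Set.empty 0 [] (Or.inl rfl)
  obtain ⟨m, hm1, hupd, hmem⟩ := pv_upd_good ks 1 le_rfl (by
    intro pre x post he
    rcases hgood0 pre x post he with h | h
    · exact Or.inl h
    · exact Or.inr (List.mem_append_right _ (by simpa using h)))
  set dA : PySem.Dict Int Int := ks.foldl (fun d x => d.insert x (d.getD x 0 + 1)) d0 with hdA
  have hd0keys : d0.keys = [0] := by rw [hd0]; decide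
  have hrange1 : PySem.List.pyRange 0 1 1 = [(0 : Int)] := by decide
  have hkeysA : dA.keys = PySem.List.pyRange 0 m 1 := by
    rw [hdA, PySem.Dict.keys_foldl_insert, hd0keys, ← hrange1, hupd]
  have hnodupA : dA.keys.Nodup := by
    rw [hkeysA]; exact PySem.List.nodup_pyRange_one 0 m
  have hgetDA : ∀ v : Int, dA.getD v 0 = d0.getD v 0 + ks.count v :=
    fun v => PySem.Dict.getD_foldl_insert_add_one ks d0 v
  have hd0get : ∀ v : Int, v ≠ 0 → d0.getD v 0 = 0 := by
    intro v hv
    rw [hd0, PySem.Dict.getD_insert, if_neg hv]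
    exact PySem.Dict.getD_empty v 0
  have hr01 : PySem.List.pyRange 0 m 1 = 0 :: PySem.List.pyRange 1 m 1 := by
    rw [PySem.List.pyRange_one_cons (by omega)]
    norm_num
  have hAfinal : ((dA.erase 0).items : List (Int × Int)) =
      (PySem.List.pyRange 1 m 1).map (fun k => (k, (ks.count k : Int))) := by
    have he : (dA.erase 0).items = dA.items.filter (fun p => !(p.1 == 0)) := rfl
    rw [he, PySem.Dict.items_eq_map_keys dA hnodupA 0, List.filter_map, hkeysA, hr01]
    rw [List.filter_cons]
    simp only [Function.comp_def, beq_self_eq_true, Bool.not_true, Bool.false_eq_true, if_false]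
    have hftail : (PySem.List.pyRange 1 m 1).filter (fun k => !(k == 0)) =
        PySem.List.pyRange 1 m 1 := by
      apply List.filter_eq_self.mpr
      intro a ha
      have h1 := (PySem.List.mem_pyRange_one).1 ha
      have hne : a ≠ 0 := by omega
      simp [hne]
    rw [hftail]
    apply List.map_congr_left
    intro k hk
    have hk1 := (PySem.List.mem_pyRange_one).1 hk
    rw [hgetDA k, hd0get k (by omega)]
    norm_num
  -- B's counting
  set parts : List (PySem.Set Int × Int) :=
    C.foldl
      (fun parts c =>
        parts ++ (parts.filter (fun uk => PySem.Set.inter uk.1 c = [])).map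
          (fun uk => (PySem.Set.union uk.1 c, uk.2 + 1)))
      [((PySem.Set.empty : PySem.Set Int), (0 : Int))] with hpartsdef
  have hpartsm : ((parts.map (fun p => p.2) : List Int) : Multiset Int) = (ks : Multiset Int) := by
    rw [← Multiset.map_coe, hpartsdef, pv_parts C, hks, pv_szs_mp C PySem.Set.empty 0]
    apply Multiset.map_congr rfl
    intro p _
    omega
  have hperm : (parts.map (fun p => p.2)).Perm ks := Multiset.coe_eq_coe.mp hpartsm
  set pos : List Int := (parts.map (fun p => p.2)).filter (fun k => decide (k > 0)) with hpos
  have hcounts :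
      parts.foldl
        (fun d uk => if uk.2 > 0 then d.insert uk.2 (d.getD uk.2 0 + 1) else d)
        (PySem.Dict.empty : PySem.Dict Int Int) = PySem.Dict.counter pos := by
    rw [← List.foldl_map (f := fun (uk : PySem.Set Int × Int) => uk.2)
      (g := fun (d : PySem.Dict Int Int) (k : Int) =>
        if k > 0 then d.insert k (d.getD k 0 + 1) else d)]
    rw [PySem.List.foldl_ite_eq_foldl_filter (p := fun (k : Int) => k > 0)
      (f := fun (d : PySem.Dict Int Int) (k : Int) => d.insert k (d.getD k 0 + 1))
      (l := parts.map (fun p => p.2)) (init := (PySem.Dict.empty : PySem.Dict Int Int))]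
    rw [PySem.Dict.foldl_insert_getD_add_one_eq_counter]
  have hmemks : ∀ a : Int, 1 ≤ a → a < m → a ∈ ks := by
    intro a h1 h2
    have : a ∈ PySem.List.pyRange 0 m 1 := (PySem.List.mem_pyRange_one).2 ⟨by omega, h2⟩
    rw [← hupd] at this
    rcases (PySem.Set.mem_update _ _ _).1 this with h | h
    · rw [hrange1] at h
      simp at h
      omega
    · exact h
  have hsorted : PySem.List.sorted (PySem.Dict.counter pos).keys (fun x => x) false =
      PySem.List.pyRange 1 m 1 := by
    rw [PySem.Dict.keys_counter]
    apply PySem.List.sorted_eq_of_perm_of_pairwise_lt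
    · apply (List.perm_ext_iff_of_nodup (PySem.List.nodup_pyRange_one 1 m)
        (PySem.Set.nodup_ofList pos)).mpr
      intro a
      constructor
      · intro ha
        have h1 := (PySem.List.mem_pyRange_one).1 ha
        apply (PySem.Set.mem_ofList pos a).2
        rw [hpos]
        apply List.mem_filter.mpr
        refine ⟨?_, by simp; omega⟩
        exact hperm.symm.subset (hmemks a h1.1 h1.2)
      · intro ha
        have h1 := (PySem.Set.mem_ofList pos a).1 ha
        rw [hpos] at h1
        have h2 := List.mem_filter.mp h1
        have h3 : a ∈ ks := hperm.subset h2.1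
        have h4 := hmem a h3
        have h5 : 0 < a := by simpa using h2.2
        exact (PySem.List.mem_pyRange_one).2 ⟨by omega, h4.2⟩
    · exact PySem.List.pairwise_lt_pyRange_one 1 m
  have hBfinal :
      ((PySem.List.sorted (PySem.Dict.counter pos).keys (fun x => x) false).foldl
          (fun d k => d.insert k ((PySem.Dict.counter pos).getD k 0))
          (PySem.Dict.empty : PySem.Dict Int Int)).items =
        (PySem.List.pyRange 1 m 1).map (fun k => (k, (ks.count k : Int))) := by
    rw [hsorted]
    rw [PySem.Dict.items_foldl_insert_fresh (PySem.List.pyRange 1 m 1) (fun k => k)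
      (fun k => (PySem.Dict.counter pos).getD k 0) PySem.Dict.empty
      (fun a _ => PySem.Dict.contains_empty a)
      (by simpa using PySem.List.nodup_pyRange_one 1 m)]
    rw [show (PySem.Dict.empty : PySem.Dict Int Int).items = [] from rfl, List.nil_append]
    apply List.map_congr_left
    intro a ha
    have h1 := (PySem.List.mem_pyRange_one).1 ha
    rw [PySem.Dict.getD_counter pos a]
    congr 1
    rw [hpos]
    rw [List.count_filter (by simp; omega)]
    exact congrArg Int.ofNat (hperm.count_eq a)
  rw [hcnt, hAfinal]
  dsimp only
  rw [hcounts, hBfinal]
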